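-- pv_equiv track=rewrite | github.com/kibum97/dbfold2 | dbfold/utils/visualize/secondarystructure.py | _extract_secondary_segments
-- ===== SOURCE A (Python) =====
-- def _extract_secondary_segments(dssp_labels):
--     """
--     Extracts start and end indices of each secondary structure segment from the DSSP labels.
--
--     Parameters
--     ----------
--     dssp_labels : list of str
--         List of DSSP labels representing secondary structure elements.
--     Returns
--     -------
--     segments : list of tuples
--         List of tuples where each tuple contains the start and end indices of a secondary structure segment.
--         Each tuple is of the form (ss_label, start_index, end_index).
--     """
--     segments = []
--     current_segment = None
--
--     for i, label in enumerate(dssp_labels):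
--         if label in ['H', 'E', 'C']:  # Helix, Strand, Coil
--             if current_segment is None or current_segment[0] != label:
--                 if current_segment is not None:
--                     segments.append(tuple(current_segment))
--                 current_segment = [label, i, i]
--             elif current_segment[0] == label:
--                 # Extend the current segment
--                 current_segment[2] = i
--         else:
--             raise ValueError(f"Unexpected DSSP label: {label}. Please use the simplified DSSP codes.")
--
--     if current_segment is not None:
--         segments.append(tuple(current_segment))
--
--     return segments
-- ===== SOURCE B (Python) =====
-- def _extract_secondary_segments(dssp_labels):
--     for label in dssp_labels:
--         if label not in ('H', 'E', 'C'):
--             raise ValueError(f"Unexpected DSSP label: {label}. Please use the simplified DSSP codes.")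
--     if not dssp_labels:
--         return []
--     n = len(dssp_labels)
--     breaks = [i + 1 for i, (a, b) in enumerate(zip(dssp_labels, dssp_labels[1:])) if a != b]
--     starts = [0] + breaks
--     ends = breaks + [n]
--     return [(dssp_labels[s], s, e - 1) for s, e in zip(starts, ends)]
-- ===== Notes on version B (the rewrite author's own statement) =====
-- stated objective: alternative
-- what changed: Replaces A's single-pass mutable current-segment state machine by staged passes: validate all labels, detect break positions by comparing adjacent pairs (zip of the list with its shift), and assemble segments by zipping the start list with the end list.
import Mathlib
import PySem

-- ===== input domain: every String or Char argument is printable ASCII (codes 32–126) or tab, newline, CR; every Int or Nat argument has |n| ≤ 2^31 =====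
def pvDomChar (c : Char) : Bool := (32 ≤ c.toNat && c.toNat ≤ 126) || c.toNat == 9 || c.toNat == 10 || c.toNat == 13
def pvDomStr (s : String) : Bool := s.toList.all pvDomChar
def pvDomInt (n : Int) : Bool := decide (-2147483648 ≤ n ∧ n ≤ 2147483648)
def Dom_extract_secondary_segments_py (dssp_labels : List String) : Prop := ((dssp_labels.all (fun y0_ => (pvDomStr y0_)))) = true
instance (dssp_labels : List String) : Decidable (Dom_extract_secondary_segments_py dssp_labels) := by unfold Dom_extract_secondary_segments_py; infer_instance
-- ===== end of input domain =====

-- B replaces A's single-pass mutable current-segment state machine by staged passes: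
-- validate, find break positions from adjacent pairs, zip starts with ends (objective: alternative).
-- Both A and B raise ValueError on a label outside {H,E,C}; Pre_ excludes exactly those inputs.

-- ===== PORT A =====
-- A's loop: state = (accumulated segments, optional current segment [label, start, end]).
def segLoopA : List String → Int → List (String × Int × Int) → Option (String × Int × Int) →
    List (String × Int × Int)
  | [], _, segs, cur =>
    match cur with
    | none => segs
    | some c => segs ++ [c]
  | label :: rest, i, segs, cur =>
    if label = "H" ∨ label = "E" ∨ label = "C" then
      match cur with
      | none => segLoopA rest (i + 1) segs (some (label, i, i))
      | some (l, s, e) =>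
        if l ≠ label then segLoopA rest (i + 1) (segs ++ [(l, s, e)]) (some (label, i, i))
        else segLoopA rest (i + 1) segs (some (l, s, i))
    else segs  -- Python raises ValueError here; excluded by Pre_

def extract_secondary_segments_py (dssp_labels : List String) : List (String × Int × Int) :=
  segLoopA dssp_labels 0 [] none

-- ===== PORT B =====
-- breaks = [i + 1 for i, (a, b) in enumerate(zip(dssp_labels, dssp_labels[1:])) if a != b]
def breaksB (xs : List String) : List Int :=
  (PySem.List.enumerate (xs.zip (xs.drop 1)) 0).filterMap
    (fun p => if p.2.1 ≠ p.2.2 then some (p.1 + 1) else none)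

def extract_secondary_segments_py_alt (dssp_labels : List String) : List (String × Int × Int) :=
  -- the validation loop raises ValueError on the first invalid label; excluded by Pre_
  if dssp_labels.all (fun l => l == "H" || l == "E" || l == "C") then
    if dssp_labels = [] then []
    else
      let n : Int := dssp_labels.length
      let breaks := breaksB dssp_labels
      let starts := (0 : Int) :: breaks
      let ends := breaks ++ [n]
      -- dssp_labels[s]: s is always a valid nonnegative index, so .getD "" is never taken
      (starts.zip ends).map (fun se =>
        ((PySem.List.pyGet? dssp_labels se.1).getD "", se.1, se.2 - 1))
  else []

-- ===== PRECONDITION & SPEC =====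
-- Pre_ excludes exactly the inputs on which A (and B) raises ValueError: a label outside {H,E,C}.
def Pre_extract_secondary_segments_py (dssp_labels : List String) : Prop :=
  ∀ x ∈ dssp_labels, x = "H" ∨ x = "E" ∨ x = "C"
instance (dssp_labels : List String) : Decidable (Pre_extract_secondary_segments_py dssp_labels) := by
  unfold Pre_extract_secondary_segments_py; infer_instance

def pvWitness_extract_secondary_segments_py : List String := ["H", "H", "E", "C", "C", "C", "H"]

def Spec_extract_secondary_segments_py (dssp_labels : List String) (out : List (String × Int × Int)) : Prop := out = extract_secondary_segments_py_alt dssp_labels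
instance (dssp_labels : List String) (out : List (String × Int × Int)) : Decidable (Spec_extract_secondary_segments_py dssp_labels out) := by unfold Spec_extract_secondary_segments_py; infer_instance

-- ===== CLAIM (what is proved, stated in full; the proofs are below) =====
def Claim_equal_extract_secondary_segments_py : Prop := ∀ (dssp_labels : List String), Dom_extract_secondary_segments_py dssp_labels → Pre_extract_secondary_segments_py dssp_labels → Spec_extract_secondary_segments_py dssp_labels (extract_secondary_segments_py dssp_labels)

-- ===== LEMMAS AND PROOFS =====

-- Proof-side normal form: the segments as one run per recursion step.
def segRuns : List String → Int → List (String × Int × Int)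
  | [], _ => []
  | label :: rest, idx =>
    let run := rest.takeWhile (· == label)
    (label, idx, idx + run.length) :: segRuns (rest.dropWhile (· == label)) (idx + 1 + run.length)
termination_by xs _ => xs.length
decreasing_by
  simp only [List.length_cons]
  exact Nat.lt_succ_of_le (List.length_dropWhile_le _ _)

-- A's loop with a valid open segment emits the extension of that segment and then runs.
theorem segLoopA_open (xs : List String)
    (hv : ∀ x ∈ xs, x = "H" ∨ x = "E" ∨ x = "C") :
    ∀ (i : Int) (segs : List (String × Int × Int)) (l : String) (s : Int),
      (l = "H" ∨ l = "E" ∨ l = "C") →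
      segLoopA xs i segs (some (l, s, i - 1)) =
        segs ++ (l, s, i - 1 + (xs.takeWhile (· == l)).length) ::
          segRuns (xs.dropWhile (· == l)) (i + (xs.takeWhile (· == l)).length) := by
  induction xs with
  | nil => intro i segs l s _; simp [segLoopA, segRuns]
  | cons x rest ih =>
    intro i segs l s hl
    have hx := hv x (List.mem_cons_self ..)
    have hrest : ∀ y ∈ rest, y = "H" ∨ y = "E" ∨ y = "C" :=
      fun y hy => hv y (List.mem_cons_of_mem _ hy)
    by_cases hxl : l = x
    · subst hxl
      have h1 : segLoopA (l :: rest) i segs (some (l, s, i - 1)) =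
          segLoopA rest (i + 1) segs (some (l, s, i)) := by
        simp [segLoopA, hl]
      rw [h1]
      have h2 := ih hrest (i + 1) segs l s hl
      have hi : i + 1 - 1 = i := by ring
      rw [hi] at h2
      rw [h2]
      simp [List.takeWhile, List.dropWhile]
      congr 1
      ring
    · have h1 : segLoopA (x :: rest) i segs (some (l, s, i - 1)) =
          segLoopA rest (i + 1) (segs ++ [(l, s, i - 1)]) (some (x, i, i)) := by
        have : l ≠ x := hxl
        simp [segLoopA, hx, this]
      rw [h1]
      have hi : i = i + 1 - 1 := by ring
      have h2 := ih hrest (i + 1) (segs ++ [(l, s, i - 1)]) x i hx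
      rw [← hi] at h2
      rw [h2]
      have hxl' : ¬ (x == l) = true := by simp; exact fun h => hxl h.symm
      simp [List.takeWhile, List.dropWhile, hxl', segRuns]

-- breaks with a shifted enumerate start is the shift of breaks.
theorem breaksAux_shift (xs : List String) :
    ∀ s : Int,
      (PySem.List.enumerate (xs.zip (xs.drop 1)) s).filterMap
        (fun p => if p.2.1 ≠ p.2.2 then some (p.1 + 1) else none) =
      (breaksB xs).map (· + s) := by
  unfold breaksB
  generalize xs.zip (xs.drop 1) = ps
  have H : ∀ (ps : List (String × String)) (s t : Int),
      (PySem.List.enumerate ps (t + s)).filterMap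
        (fun p => if p.2.1 ≠ p.2.2 then some (p.1 + 1) else none) =
      ((PySem.List.enumerate ps t).filterMap
        (fun p => if p.2.1 ≠ p.2.2 then some (p.1 + 1) else none)).map (· + s) := by
    intro ps
    induction ps with
    | nil => intro s t; simp [PySem.List.enumerate_nil]
    | cons p rest ih =>
      obtain ⟨a, b⟩ := p
      intro s t
      simp only [PySem.List.enumerate_cons, List.filterMap_cons]
      have h2 : t + s + 1 = (t + 1) + s := by ring
      rw [h2, ih s (t + 1)]
      by_cases hp : a = b
      · simp [hp]
      · simp only [ne_eq, hp, not_false_eq_true, if_pos, List.map_cons]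
  intro s
  have := H ps s 0
  simpa using this

-- peel lemma for breaks
theorem breaksB_cons_cons (x y : String) (t : List String) :
    breaksB (x :: y :: t) =
      (if x = y then [] else [1]) ++ (breaksB (y :: t)).map (· + 1) := by
  conv_lhs => unfold breaksB
  simp only [List.drop_one, List.tail_cons, List.zip_cons_cons,
    PySem.List.enumerate_cons, List.filterMap_cons, zero_add]
  have h := breaksAux_shift (y :: t) 1
  simp only [List.drop_one, List.tail_cons] at h
  rw [h]
  by_cases hxy : x = y <;> simp [hxy]

theorem breaksB_pos (xs : List String) : ∀ b ∈ breaksB xs, 1 ≤ b := by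
  intro b hb
  unfold breaksB at hb
  rw [List.mem_filterMap] at hb
  obtain ⟨p, hp, hf⟩ := hb
  by_cases hc : p.2.1 = p.2.2
  · simp [hc] at hf
  · simp only [ne_eq, hc, not_false_eq_true, if_pos, Option.some.injEq] at hf
    rw [PySem.List.mem_enumerate_iff] at hp
    obtain ⟨k, hk, hpk⟩ := hp
    have : p.1 = (k : Int) := by rw [hpk]; simp
    omega

-- segRuns at offset i is the shift of segRuns at 0.
theorem segRuns_shift (xs : List String) (i : Int) :
    segRuns xs i = (segRuns xs 0).map (fun p => (p.1, p.2.1 + i, p.2.2 + i)) := by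
  have H : ∀ (m : Nat) (xs : List String), xs.length ≤ m → ∀ i : Int,
      segRuns xs i = (segRuns xs 0).map (fun p => (p.1, p.2.1 + i, p.2.2 + i)) := by
    intro m
    induction m with
    | zero =>
      intro xs h i
      have hx : xs = [] := List.length_eq_zero_iff.mp (Nat.le_zero.mp h)
      subst hx; simp [segRuns]
    | succ m ih =>
      intro xs h i
      cases xs with
      | nil => simp [segRuns]
      | cons x rest =>
        simp only [segRuns]
        have hlen : (rest.dropWhile (· == x)).length ≤ m := by
          have := List.length_dropWhile_le (· == x) rest
          simp at h; omega
        rw [ih _ hlen (i + 1 + ((rest.takeWhile (· == x)).length : Int)),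
            ih _ hlen (0 + 1 + ((rest.takeWhile (· == x)).length : Int)),
            List.map_cons, List.map_map]
        congr 1
        · simp; ring
        · apply List.map_congr_left
          intro p _
          simp [Function.comp]
          constructor <;> ring
  exact H xs.length xs le_rfl i


def shiftSeg (p : String × Int × Int) : String × Int × Int := (p.1, p.2.1 + 1, p.2.2 + 1)

theorem segRuns_succ (xs : List String) (i : Int) :
    segRuns xs (i + 1) = (segRuns xs i).map shiftSeg := by
  rw [segRuns_shift xs (i + 1), segRuns_shift xs i, List.map_map]
  apply List.map_congr_left
  intro p _
  simp [shiftSeg]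
  constructor <;> ring

theorem pyGet_cons_shift (x : String) (r : List String) (s : Int) (hs : 0 ≤ s) :
    PySem.List.pyGet? (x :: r) (s + 1) = PySem.List.pyGet? r s := by
  have h : s = ((s.toNat : Nat) : Int) := (Int.toNat_of_nonneg hs).symm
  rw [h, PySem.List.pyGet?_cons_succ]

-- B's post-validation core equals segRuns.
theorem bcore_eq (xs : List String) (hne : xs ≠ []) :
    (((0 : Int) :: breaksB xs).zip (breaksB xs ++ [(xs.length : Int)])).map (fun se =>
        ((PySem.List.pyGet? xs se.1).getD "", se.1, se.2 - 1)) = segRuns xs 0 := by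
  induction xs with
  | nil => exact absurd rfl hne
  | cons x rest ih =>
    cases rest with
    | nil =>
      simp [breaksB, PySem.List.enumerate_nil, segRuns]
    | cons y t =>
      have hIH := ih (by simp)
      by_cases hxy : x = y
      · subst hxy
        have hbr : breaksB (x :: x :: t) = (breaksB (x :: t)).map (· + 1) := by
          rw [breaksB_cons_cons]; simp
        obtain ⟨c, u, hcu⟩ : ∃ c u, breaksB (x :: t) ++ [(((x :: t).length : Nat) : Int)] = c :: u :=
          List.exists_cons_of_ne_nil (by simp)
        have hlen : (((x :: x :: t).length : Nat) : Int) = (((x :: t).length : Nat) : Int) + 1 := by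
          simp
        have hsecond : (breaksB (x :: t)).map (· + 1) ++ [(((x :: t).length : Nat) : Int) + 1] =
            (c + 1) :: u.map (· + 1) := by
          have h1 : (breaksB (x :: t)).map (· + 1) ++ [(((x :: t).length : Nat) : Int) + 1] =
              ((breaksB (x :: t)) ++ [(((x :: t).length : Nat) : Int)]).map (· + 1) := by
            simp
          rw [h1, hcu]; simp
        rw [hbr, hlen, hsecond]
        rw [hcu] at hIH
        rw [List.zip_cons_cons, List.map_cons]
        rw [List.zip_cons_cons, List.map_cons] at hIH
        rw [List.zip_map, List.map_map]
        have hmap : List.map ((fun se => ((PySem.List.pyGet? (x :: x :: t) se.1).getD "", se.1, se.2 - 1)) ∘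
              Prod.map (· + 1) (· + 1)) (List.zip (breaksB (x :: t)) u) =
            List.map (shiftSeg ∘ (fun se => ((PySem.List.pyGet? (x :: t) se.1).getD "", se.1, se.2 - 1)))
              (List.zip (breaksB (x :: t)) u) := by
          apply List.map_congr_left
          intro se hse
          have hmem : se.1 ∈ breaksB (x :: t) := (List.of_mem_zip hse).1
          have hpos : (1 : Int) ≤ se.1 := breaksB_pos _ _ hmem
          simp [Function.comp, Prod.map, shiftSeg, pyGet_cons_shift x (x :: t) se.1 (by omega)]
        rw [hmap, ← List.map_map]
        have htw : (x :: t).takeWhile (· == x) = x :: t.takeWhile (· == x) := by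
          simp [List.takeWhile]
        have hdw : (x :: t).dropWhile (· == x) = t.dropWhile (· == x) := by
          simp [List.dropWhile]
        simp only [segRuns, htw, hdw, List.length_cons, Nat.cast_add, Nat.cast_one,
          PySem.List.pyGet?_zero_cons, Option.getD_some, List.cons.injEq, Prod.mk.injEq] at hIH ⊢
        obtain ⟨⟨-, -, hc⟩, htail⟩ := hIH
        refine ⟨⟨trivial, trivial, by omega⟩, ?_⟩
        rw [htail]
        have hidx : (0 : Int) + 1 + (((t.takeWhile (· == x)).length : Int) + 1) =
            (0 + 1 + ((t.takeWhile (· == x)).length : Int)) + 1 := by ring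
        rw [hidx, segRuns_succ]
      · have hbr : breaksB (x :: y :: t) = 1 :: (breaksB (y :: t)).map (· + 1) := by
          rw [breaksB_cons_cons]; simp [hxy]
        have hlen : (((x :: y :: t).length : Nat) : Int) = (((y :: t).length : Nat) : Int) + 1 := by
          simp
        have hsecond : (1 :: (breaksB (y :: t)).map (· + 1)) ++ [(((y :: t).length : Nat) : Int) + 1] =
            1 :: ((breaksB (y :: t)) ++ [(((y :: t).length : Nat) : Int)]).map (· + 1) := by
          simp
        rw [hbr, hlen, hsecond]
        rw [List.zip_cons_cons, List.map_cons]
        have hfirst : (1 : Int) :: (breaksB (y :: t)).map (· + 1) =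
            ((0 : Int) :: breaksB (y :: t)).map (· + 1) := by simp
        rw [hfirst, List.zip_map, List.map_map]
        have hmap : List.map ((fun se => ((PySem.List.pyGet? (x :: y :: t) se.1).getD "", se.1, se.2 - 1)) ∘
              Prod.map (· + 1) (· + 1)) (List.zip ((0 : Int) :: breaksB (y :: t)) (breaksB (y :: t) ++ [(((y :: t).length : Nat) : Int)])) =
            List.map (shiftSeg ∘ (fun se => ((PySem.List.pyGet? (y :: t) se.1).getD "", se.1, se.2 - 1)))
              (List.zip ((0 : Int) :: breaksB (y :: t)) (breaksB (y :: t) ++ [(((y :: t).length : Nat) : Int)])) := by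
          apply List.map_congr_left
          intro se hse
          have hmem : se.1 ∈ (0 : Int) :: breaksB (y :: t) := (List.of_mem_zip hse).1
          have hpos : (0 : Int) ≤ se.1 := by
            rcases List.mem_cons.mp hmem with h | h
            · omega
            · have := breaksB_pos _ _ h; omega
          simp [Function.comp, Prod.map, shiftSeg, pyGet_cons_shift x (y :: t) se.1 hpos]
        rw [hmap, ← List.map_map, hIH]
        have hyx : (y == x) = false := by
          simp only [beq_eq_false_iff_ne, ne_eq]
          exact fun h => hxy h.symm
        have htw : (y :: t).takeWhile (· == x) = [] := by
          simp [List.takeWhile, hyx]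
        have hdw : (y :: t).dropWhile (· == x) = y :: t := by
          simp [List.dropWhile, hyx]
        simp only [segRuns, htw, hdw, List.length_nil, Nat.cast_zero,
          PySem.List.pyGet?_zero_cons, Option.getD_some, List.cons.injEq, Prod.mk.injEq]
        refine ⟨⟨trivial, trivial, by omega⟩, ?_⟩
        have hidx : (0 : Int) + 1 + (0 : Int) = 0 + 1 := by ring
        rw [hidx]
        rw [show (0 : Int) + 1 + 1 + ((t.takeWhile (· == y)).length : Int) =
            (0 + 1 + ((t.takeWhile (· == y)).length : Int)) + 1 by ring, segRuns_succ]
        simp [shiftSeg]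
        omega

-- ===== VERDICT (by name: the statement is the Claim_ definition above) =====
theorem extract_secondary_segments_py_spec : Claim_equal_extract_secondary_segments_py := by
  intro xs _ hpre
  unfold Spec_extract_secondary_segments_py extract_secondary_segments_py
    extract_secondary_segments_py_alt
  have hall : xs.all (fun l => l == "H" || l == "E" || l == "C") = true := by
    rw [List.all_eq_true]
    intro l hl
    rcases hpre l hl with h | h | h <;> simp [h]
  rw [if_pos hall]
  cases xs with
  | nil => simp [segLoopA]
  | cons x rest =>
    rw [if_neg (by simp)]
    dsimp only
    have hx := hpre x (List.mem_cons_self ..)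
    have hrest : ∀ y ∈ rest, y = "H" ∨ y = "E" ∨ y = "C" :=
      fun y hy => hpre y (List.mem_cons_of_mem _ hy)
    have h1 : segLoopA (x :: rest) 0 [] none = segLoopA rest 1 [] (some (x, 0, 0)) := by
      simp [segLoopA, hx]
    have h2 := segLoopA_open rest hrest 1 [] x 0 hx
    norm_num at h2
    rw [h1, h2, bcore_eq (x :: rest) (by simp)]
    conv_rhs => rw [segRuns]
    simp only [List.cons.injEq, Prod.mk.injEq]
    refine ⟨⟨trivial, trivial, by omega⟩, ?_⟩
    congr 1
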